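-- pv_equiv track=rewrite | github.com/amandeephy/StripTkMaps | Ext_functions.py | setRunDirectory
-- ===== SOURCE A (Python) =====
-- def setRunDirectory(runNumber):
--     # Don't forget to add an entry when there is a new era
--     dirDict = { 325799:['Data2018', 'HIRun2018'],\
--                 315252:['Data2018', 'Run2018'],\
--                 308336:['Data2018', 'Commissioning2018'],\
--                 294644:['Data2017', 'Run2017'],\
--                 290123:['Data2017', 'Commissioning2017'],\
--                 284500:['Data2016', 'PARun2016'],\
--                 271024:['Data2016', 'Run2016'],\
--                 264200:['Data2016', 'Commissioning2016'],\
--                 246907:['Data2015', 'Run2015'],\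
--                 232881:['Data2015', 'Commissioning2015'],\
--                 211658:['Data2013', 'Run2013'],\
--                 209634:['Data2013', 'HIRun2013'],\
--                 190450:['Data2012', 'Run2012']}
--     runKey=0
--     for key in sorted(dirDict):
--         if runNumber > key:
--             runKey=key
--     return dirDict[runKey]
-- ===== SOURCE B (Python) =====
-- # Binary search over a pre-sorted era table instead of a linear scan of sorted dict keys.
-- _ERAS = [(190450, ['Data2012', 'Run2012']),
--          (209634, ['Data2013', 'HIRun2013']),
--          (211658, ['Data2013', 'Run2013']),
--          (232881, ['Data2015', 'Commissioning2015']),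
--          (246907, ['Data2015', 'Run2015']),
--          (264200, ['Data2016', 'Commissioning2016']),
--          (271024, ['Data2016', 'Run2016']),
--          (284500, ['Data2016', 'PARun2016']),
--          (290123, ['Data2017', 'Commissioning2017']),
--          (294644, ['Data2017', 'Run2017']),
--          (308336, ['Data2018', 'Commissioning2018']),
--          (315252, ['Data2018', 'Run2018']),
--          (325799, ['Data2018', 'HIRun2018'])]
--
-- def setRunDirectory(runNumber):
--     # lo = number of era thresholds strictly below runNumber (bisect_left)
--     lo, hi = 0, len(_ERAS)
--     while lo < hi:
--         mid = (lo + hi) // 2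
--         if _ERAS[mid][0] < runNumber:
--             lo = mid + 1
--         else:
--             hi = mid
--     if lo == 0:
--         raise ValueError("run number %d predates the earliest known era" % runNumber)
--     return _ERAS[lo - 1][1]
-- ===== Notes on version B (the rewrite author's own statement) =====
-- stated objective: alternative
-- what changed: Replaces the linear scan over sorted(dict) keys with a binary search (bisect_left) over a pre-sorted era table; Pre_ excludes runNumber <= 190450, where A raises KeyError and B raises a descriptive ValueError.
-- outside the precondition, e.g. on setRunDirectory(190450): A raises KeyError, B raises ValueError
import Mathlib
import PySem

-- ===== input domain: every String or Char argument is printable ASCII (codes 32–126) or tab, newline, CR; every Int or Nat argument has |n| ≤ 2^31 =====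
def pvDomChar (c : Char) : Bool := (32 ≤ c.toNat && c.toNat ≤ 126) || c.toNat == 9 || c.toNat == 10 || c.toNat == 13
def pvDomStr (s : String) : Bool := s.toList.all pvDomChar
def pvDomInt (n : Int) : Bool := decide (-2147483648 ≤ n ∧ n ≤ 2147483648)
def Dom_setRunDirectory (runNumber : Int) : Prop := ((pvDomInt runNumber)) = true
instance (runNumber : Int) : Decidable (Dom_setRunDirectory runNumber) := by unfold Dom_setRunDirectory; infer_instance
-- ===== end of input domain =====

-- B replaces A's linear scan of sorted dict keys with a binary search over a pre-sorted era table (alternative algorithm, same result on Pre_).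

-- ===== PORT A =====
def pvDirDict : PySem.Dict Int (List String) :=
  PySem.Dict.ofList
    [ (325799, ["Data2018", "HIRun2018"]),
      (315252, ["Data2018", "Run2018"]),
      (308336, ["Data2018", "Commissioning2018"]),
      (294644, ["Data2017", "Run2017"]),
      (290123, ["Data2017", "Commissioning2017"]),
      (284500, ["Data2016", "PARun2016"]),
      (271024, ["Data2016", "Run2016"]),
      (264200, ["Data2016", "Commissioning2016"]),
      (246907, ["Data2015", "Run2015"]),
      (232881, ["Data2015", "Commissioning2015"]),
      (211658, ["Data2013", "Run2013"]),
      (209634, ["Data2013", "HIRun2013"]),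
      (190450, ["Data2012", "Run2012"]) ]

def setRunDirectory (runNumber : Int) : List String :=
  let runKey :=
    (PySem.List.sorted (PySem.Dict.keys pvDirDict) (fun k => k) false).foldl
      (fun runKey key => if runNumber > key then key else runKey) 0
  -- dirDict[runKey]: Python raises KeyError when runKey = 0; Pre_ excludes that, port returns []
  (PySem.Dict.get? pvDirDict runKey).getD []

-- ===== PORT B =====
def pvEras : List (Int × List String) :=
  [ (190450, ["Data2012", "Run2012"]),
    (209634, ["Data2013", "HIRun2013"]),
    (211658, ["Data2013", "Run2013"]),
    (232881, ["Data2015", "Commissioning2015"]),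
    (246907, ["Data2015", "Run2015"]),
    (264200, ["Data2016", "Commissioning2016"]),
    (271024, ["Data2016", "Run2016"]),
    (284500, ["Data2016", "PARun2016"]),
    (290123, ["Data2017", "Commissioning2017"]),
    (294644, ["Data2017", "Run2017"]),
    (308336, ["Data2018", "Commissioning2018"]),
    (315252, ["Data2018", "Run2018"]),
    (325799, ["Data2018", "HIRun2018"]) ]

-- the while-loop of Source B, step for step (bisect_left)
def pvBisect (runNumber : Int) (lo hi : Nat) : Nat :=
  if lo < hi then
    let mid := (lo + hi) / 2
    if (PySem.List.pyGetD pvEras (mid : Int) (0, [])).1 < runNumber then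
      pvBisect runNumber (mid + 1) hi
    else
      pvBisect runNumber lo mid
  else lo
termination_by hi - lo
decreasing_by all_goals omega

def setRunDirectory_alt (runNumber : Int) : List String :=
  let lo := pvBisect runNumber 0 pvEras.length
  -- lo = 0: Source B raises ValueError; Pre_ excludes that, port returns []
  if lo = 0 then []
  else (PySem.List.pyGetD pvEras ((lo : Int) - 1) (0, [])).2

-- ===== PRECONDITION & SPEC =====
-- Pre_ excludes exactly runNumber ≤ 190450, where A raises KeyError(0) (and B raises ValueError).
def Pre_setRunDirectory (runNumber : Int) : Prop := 190450 < runNumber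
instance (runNumber : Int) : Decidable (Pre_setRunDirectory runNumber) := by unfold Pre_setRunDirectory; infer_instance
def pvWitness_setRunDirectory : Int := 300000

def Spec_setRunDirectory (runNumber : Int) (out : List String) : Prop := out = setRunDirectory_alt runNumber
instance (runNumber : Int) (out : List String) : Decidable (Spec_setRunDirectory runNumber out) := by unfold Spec_setRunDirectory; infer_instance

-- ===== CLAIM (what is proved, stated in full; the proofs are below) =====
def Claim_equal_setRunDirectory : Prop := ∀ (runNumber : Int), Dom_setRunDirectory runNumber → Pre_setRunDirectory runNumber → Spec_setRunDirectory runNumber (setRunDirectory runNumber)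

-- ===== LEMMAS AND PROOFS =====

-- ===== VERDICT (by name: the statement is the Claim_ definition above) =====
set_option maxHeartbeats 1000000 in
theorem setRunDirectory_spec : Claim_equal_setRunDirectory := by
  intro r _ hpre
  unfold Spec_setRunDirectory setRunDirectory setRunDirectory_alt
  have hkeys : PySem.List.sorted (PySem.Dict.keys pvDirDict) (fun k => k) false =
      [190450, 209634, 211658, 232881, 246907, 264200, 271024, 284500, 290123,
       294644, 308336, 315252, 325799] := by decide
  rw [hkeys]
  simp only [List.foldl, show pvEras.length = 13 from rfl]
  have h0 : (190450 : Int) < r := hpre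
  by_cases c1 : r ≤ 209634
  · -- interval (190450, 209634]
    simp [pvBisect, PySem.List.pyGetD, pvEras, pvDirDict,
      PySem.Dict.get?, PySem.Dict.ofList, PySem.Dict.insert, PySem.Dict.empty, PySem.Dict.update, show (190450:Int) < r from by omega, show ¬((209634:Int) < r) from by omega, show ¬((211658:Int) < r) from by omega, show ¬((232881:Int) < r) from by omega, show ¬((246907:Int) < r) from by omega, show ¬((264200:Int) < r) from by omega, show ¬((271024:Int) < r) from by omega, show ¬((284500:Int) < r) from by omega, show ¬((290123:Int) < r) from by omega, show ¬((294644:Int) < r) from by omega, show ¬((308336:Int) < r) from by omega, show ¬((315252:Int) < r) from by omega, show ¬((325799:Int) < r) from by omega]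
    all_goals decide
  by_cases c2 : r ≤ 211658
  · -- interval (209634, 211658]
    simp [pvBisect, PySem.List.pyGetD, pvEras, pvDirDict,
      PySem.Dict.get?, PySem.Dict.ofList, PySem.Dict.insert, PySem.Dict.empty, PySem.Dict.update, show (190450:Int) < r from by omega, show (209634:Int) < r from by omega, show ¬((211658:Int) < r) from by omega, show ¬((232881:Int) < r) from by omega, show ¬((246907:Int) < r) from by omega, show ¬((264200:Int) < r) from by omega, show ¬((271024:Int) < r) from by omega, show ¬((284500:Int) < r) from by omega, show ¬((290123:Int) < r) from by omega, show ¬((294644:Int) < r) from by omega, show ¬((308336:Int) < r) from by omega, show ¬((315252:Int) < r) from by omega, show ¬((325799:Int) < r) from by omega]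
    all_goals decide
  by_cases c3 : r ≤ 232881
  · -- interval (211658, 232881]
    simp [pvBisect, PySem.List.pyGetD, pvEras, pvDirDict,
      PySem.Dict.get?, PySem.Dict.ofList, PySem.Dict.insert, PySem.Dict.empty, PySem.Dict.update, show (190450:Int) < r from by omega, show (209634:Int) < r from by omega, show (211658:Int) < r from by omega, show ¬((232881:Int) < r) from by omega, show ¬((246907:Int) < r) from by omega, show ¬((264200:Int) < r) from by omega, show ¬((271024:Int) < r) from by omega, show ¬((284500:Int) < r) from by omega, show ¬((290123:Int) < r) from by omega, show ¬((294644:Int) < r) from by omega, show ¬((308336:Int) < r) from by omega, show ¬((315252:Int) < r) from by omega, show ¬((325799:Int) < r) from by omega]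
    all_goals decide
  by_cases c4 : r ≤ 246907
  · -- interval (232881, 246907]
    simp [pvBisect, PySem.List.pyGetD, pvEras, pvDirDict,
      PySem.Dict.get?, PySem.Dict.ofList, PySem.Dict.insert, PySem.Dict.empty, PySem.Dict.update, show (190450:Int) < r from by omega, show (209634:Int) < r from by omega, show (211658:Int) < r from by omega, show (232881:Int) < r from by omega, show ¬((246907:Int) < r) from by omega, show ¬((264200:Int) < r) from by omega, show ¬((271024:Int) < r) from by omega, show ¬((284500:Int) < r) from by omega, show ¬((290123:Int) < r) from by omega, show ¬((294644:Int) < r) from by omega, show ¬((308336:Int) < r) from by omega, show ¬((315252:Int) < r) from by omega, show ¬((325799:Int) < r) from by omega]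
    all_goals decide
  by_cases c5 : r ≤ 264200
  · -- interval (246907, 264200]
    simp [pvBisect, PySem.List.pyGetD, pvEras, pvDirDict,
      PySem.Dict.get?, PySem.Dict.ofList, PySem.Dict.insert, PySem.Dict.empty, PySem.Dict.update, show (190450:Int) < r from by omega, show (209634:Int) < r from by omega, show (211658:Int) < r from by omega, show (232881:Int) < r from by omega, show (246907:Int) < r from by omega, show ¬((264200:Int) < r) from by omega, show ¬((271024:Int) < r) from by omega, show ¬((284500:Int) < r) from by omega, show ¬((290123:Int) < r) from by omega, show ¬((294644:Int) < r) from by omega, show ¬((308336:Int) < r) from by omega, show ¬((315252:Int) < r) from by omega, show ¬((325799:Int) < r) from by omega]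
    all_goals decide
  by_cases c6 : r ≤ 271024
  · -- interval (264200, 271024]
    simp [pvBisect, PySem.List.pyGetD, pvEras, pvDirDict,
      PySem.Dict.get?, PySem.Dict.ofList, PySem.Dict.insert, PySem.Dict.empty, PySem.Dict.update, show (190450:Int) < r from by omega, show (209634:Int) < r from by omega, show (211658:Int) < r from by omega, show (232881:Int) < r from by omega, show (246907:Int) < r from by omega, show (264200:Int) < r from by omega, show ¬((271024:Int) < r) from by omega, show ¬((284500:Int) < r) from by omega, show ¬((290123:Int) < r) from by omega, show ¬((294644:Int) < r) from by omega, show ¬((308336:Int) < r) from by omega, show ¬((315252:Int) < r) from by omega, show ¬((325799:Int) < r) from by omega]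
    all_goals decide
  by_cases c7 : r ≤ 284500
  · -- interval (271024, 284500]
    simp [pvBisect, PySem.List.pyGetD, pvEras, pvDirDict,
      PySem.Dict.get?, PySem.Dict.ofList, PySem.Dict.insert, PySem.Dict.empty, PySem.Dict.update, show (190450:Int) < r from by omega, show (209634:Int) < r from by omega, show (211658:Int) < r from by omega, show (232881:Int) < r from by omega, show (246907:Int) < r from by omega, show (264200:Int) < r from by omega, show (271024:Int) < r from by omega, show ¬((284500:Int) < r) from by omega, show ¬((290123:Int) < r) from by omega, show ¬((294644:Int) < r) from by omega, show ¬((308336:Int) < r) from by omega, show ¬((315252:Int) < r) from by omega, show ¬((325799:Int) < r) from by omega]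
    all_goals decide
  by_cases c8 : r ≤ 290123
  · -- interval (284500, 290123]
    simp [pvBisect, PySem.List.pyGetD, pvEras, pvDirDict,
      PySem.Dict.get?, PySem.Dict.ofList, PySem.Dict.insert, PySem.Dict.empty, PySem.Dict.update, show (190450:Int) < r from by omega, show (209634:Int) < r from by omega, show (211658:Int) < r from by omega, show (232881:Int) < r from by omega, show (246907:Int) < r from by omega, show (264200:Int) < r from by omega, show (271024:Int) < r from by omega, show (284500:Int) < r from by omega, show ¬((290123:Int) < r) from by omega, show ¬((294644:Int) < r) from by omega, show ¬((308336:Int) < r) from by omega, show ¬((315252:Int) < r) from by omega, show ¬((325799:Int) < r) from by omega]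
    all_goals decide
  by_cases c9 : r ≤ 294644
  · -- interval (290123, 294644]
    simp [pvBisect, PySem.List.pyGetD, pvEras, pvDirDict,
      PySem.Dict.get?, PySem.Dict.ofList, PySem.Dict.insert, PySem.Dict.empty, PySem.Dict.update, show (190450:Int) < r from by omega, show (209634:Int) < r from by omega, show (211658:Int) < r from by omega, show (232881:Int) < r from by omega, show (246907:Int) < r from by omega, show (264200:Int) < r from by omega, show (271024:Int) < r from by omega, show (284500:Int) < r from by omega, show (290123:Int) < r from by omega, show ¬((294644:Int) < r) from by omega, show ¬((308336:Int) < r) from by omega, show ¬((315252:Int) < r) from by omega, show ¬((325799:Int) < r) from by omega]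
    all_goals decide
  by_cases c10 : r ≤ 308336
  · -- interval (294644, 308336]
    simp [pvBisect, PySem.List.pyGetD, pvEras, pvDirDict,
      PySem.Dict.get?, PySem.Dict.ofList, PySem.Dict.insert, PySem.Dict.empty, PySem.Dict.update, show (190450:Int) < r from by omega, show (209634:Int) < r from by omega, show (211658:Int) < r from by omega, show (232881:Int) < r from by omega, show (246907:Int) < r from by omega, show (264200:Int) < r from by omega, show (271024:Int) < r from by omega, show (284500:Int) < r from by omega, show (290123:Int) < r from by omega, show (294644:Int) < r from by omega, show ¬((308336:Int) < r) from by omega, show ¬((315252:Int) < r) from by omega, show ¬((325799:Int) < r) from by omega]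
    all_goals decide
  by_cases c11 : r ≤ 315252
  · -- interval (308336, 315252]
    simp [pvBisect, PySem.List.pyGetD, pvEras, pvDirDict,
      PySem.Dict.get?, PySem.Dict.ofList, PySem.Dict.insert, PySem.Dict.empty, PySem.Dict.update, show (190450:Int) < r from by omega, show (209634:Int) < r from by omega, show (211658:Int) < r from by omega, show (232881:Int) < r from by omega, show (246907:Int) < r from by omega, show (264200:Int) < r from by omega, show (271024:Int) < r from by omega, show (284500:Int) < r from by omega, show (290123:Int) < r from by omega, show (294644:Int) < r from by omega, show (308336:Int) < r from by omega, show ¬((315252:Int) < r) from by omega, show ¬((325799:Int) < r) from by omega]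
  by_cases c12 : r ≤ 325799
  · -- interval (315252, 325799]
    simp [pvBisect, PySem.List.pyGetD, pvEras, pvDirDict,
      PySem.Dict.get?, PySem.Dict.ofList, PySem.Dict.insert, PySem.Dict.empty, PySem.Dict.update, show (190450:Int) < r from by omega, show (209634:Int) < r from by omega, show (211658:Int) < r from by omega, show (232881:Int) < r from by omega, show (246907:Int) < r from by omega, show (264200:Int) < r from by omega, show (271024:Int) < r from by omega, show (284500:Int) < r from by omega, show (290123:Int) < r from by omega, show (294644:Int) < r from by omega, show (308336:Int) < r from by omega, show (315252:Int) < r from by omega, show ¬((325799:Int) < r) from by omega]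
  · -- interval (325799, ∞)
    simp [pvBisect, PySem.List.pyGetD, pvEras, pvDirDict,
      PySem.Dict.get?, PySem.Dict.ofList, PySem.Dict.insert, PySem.Dict.empty, PySem.Dict.update, show (190450:Int) < r from by omega, show (209634:Int) < r from by omega, show (211658:Int) < r from by omega, show (232881:Int) < r from by omega, show (246907:Int) < r from by omega, show (264200:Int) < r from by omega, show (271024:Int) < r from by omega, show (284500:Int) < r from by omega, show (290123:Int) < r from by omega, show (294644:Int) < r from by omega, show (308336:Int) < r from by omega, show (315252:Int) < r from by omega, show (325799:Int) < r from by omega]
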